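-- pv_equiv track=rewrite | github.com/IES-Rafael-Alberti/2425-u2-2-2-sentencias-iterativas-jesuuslopeez | src/ej08.py | func_triangulo_numeros
-- ===== SOURCE A (Python) =====
-- def func_triangulo_numeros(numero):
--     mensaje = []
--     contador = 1
--
--     for i in range(1, numero + 1, 2):
--         mensaje2 = []
--         for z in range(i, 0, -2):
--             mensaje2.append(str(z))
--         mensaje.append(' '.join(mensaje2))
--
--     return '\n'.join(mensaje)
-- ===== SOURCE B (Python) =====
-- def func_triangulo_numeros(numero):
--     mensaje = []
--     prev = ''
--     for i in range(1, numero + 1, 2):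
--         cur = str(i) if i == 1 else str(i) + ' ' + prev
--         mensaje.append(cur)
--         prev = cur
--     return '\n'.join(mensaje)
-- ===== Notes on version B (the rewrite author's own statement) =====
-- stated objective: alternative
-- what changed: B drops A's inner descending loop and builds each row by prepending str(i) and a space to the previous row string carried in an accumulator.
import Mathlib
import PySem

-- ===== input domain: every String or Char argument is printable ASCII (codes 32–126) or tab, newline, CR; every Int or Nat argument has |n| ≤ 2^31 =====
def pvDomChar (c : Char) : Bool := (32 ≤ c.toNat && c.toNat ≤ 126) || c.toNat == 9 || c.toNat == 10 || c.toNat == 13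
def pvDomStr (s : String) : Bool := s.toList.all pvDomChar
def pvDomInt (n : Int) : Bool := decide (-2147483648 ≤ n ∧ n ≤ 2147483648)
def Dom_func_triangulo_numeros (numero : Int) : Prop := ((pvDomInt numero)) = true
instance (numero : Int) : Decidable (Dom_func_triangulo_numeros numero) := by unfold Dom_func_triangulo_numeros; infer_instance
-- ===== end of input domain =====

-- B builds each row by prepending to the previous row string instead of A's inner descending loop (different decomposition).

-- ===== PORT A =====
def func_triangulo_numeros (numero : Int) : String :=
  let mensaje := (PySem.List.pyRange 1 (numero + 1) 2).foldl
    (fun mensaje i =>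
      let mensaje2 := (PySem.List.pyRange i 0 (-2)).foldl
        (fun mensaje2 z => mensaje2 ++ [PySem.Int.toStr z]) []
      mensaje ++ [PySem.Str.join " " mensaje2]) []
  PySem.Str.join "\n" mensaje

-- ===== PORT B =====
def func_triangulo_numeros_alt (numero : Int) : String :=
  let st := (PySem.List.pyRange 1 (numero + 1) 2).foldl
    (fun st i =>
      let cur := if i == 1 then PySem.Int.toStr i else PySem.Int.toStr i ++ " " ++ st.2
      (st.1 ++ [cur], cur)) ([], "")
  PySem.Str.join "\n" st.1

-- ===== PRECONDITION & SPEC =====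
def Spec_func_triangulo_numeros (numero : Int) (out : String) : Prop := out = func_triangulo_numeros_alt numero
instance (numero : Int) (out : String) : Decidable (Spec_func_triangulo_numeros numero out) := by unfold Spec_func_triangulo_numeros; infer_instance

-- ===== CLAIM (what is proved, stated in full; the proofs are below) =====
def Claim_equal_func_triangulo_numeros : Prop := ∀ (numero : Int), Dom_func_triangulo_numeros numero → Spec_func_triangulo_numeros numero (func_triangulo_numeros numero)

-- ===== LEMMAS AND PROOFS =====

-- the row A builds for a given odd i: "i i-2 … 1"
def rowA (i : Int) : String :=
  PySem.Str.join " " ((PySem.List.pyRange i 0 (-2)).map PySem.Int.toStr)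

lemma pyRange_two_nil (a b : Int) (h : b ≤ a) : PySem.List.pyRange a b 2 = [] := by
  simp [PySem.List.pyRange]
  omega

lemma pyRange_two_cons (a b : Int) (h : a < b) :
    PySem.List.pyRange a b 2 = a :: PySem.List.pyRange (a + 2) b 2 := by
  simp only [PySem.List.pyRange]
  norm_num
  rw [if_pos h]
  by_cases h2 : a + 2 < b
  · rw [if_pos h2]
    have hc : ((b - a + 2 - 1) / 2).toNat = ((b - (a + 2) + 2 - 1) / 2).toNat + 1 := by omega
    rw [hc, List.range_succ_eq_map]
    simp [List.map_map, Function.comp]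
    exact fun k _ => by ring
  · rw [if_neg h2]
    have hc : ((b - a + 2 - 1) / 2).toNat = 1 := by omega
    rw [hc]
    simp

lemma pyRange_negtwo_cons (a b : Int) (h : b < a) :
    PySem.List.pyRange a b (-2) = a :: PySem.List.pyRange (a - 2) b (-2) := by
  simp only [PySem.List.pyRange]
  norm_num
  rw [if_pos h]
  by_cases h2 : b < a - 2
  · rw [if_pos h2]
    have hc : ((a - b + 2 - 1) / 2).toNat = ((a - 2 - b + 2 - 1) / 2).toNat + 1 := by omega
    rw [hc, List.range_succ_eq_map]
    simp [List.map_map, Function.comp]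
    exact fun k _ => by ring
  · rw [if_neg h2]
    have hc : ((a - b + 2 - 1) / 2).toNat = 1 := by omega
    rw [hc]
    simp

lemma str_join_cons_cons (sep p q : String) (rest : List String) :
    PySem.Str.join sep (p :: q :: rest) = p ++ sep ++ PySem.Str.join sep (q :: rest) := by
  simp [PySem.Str.join, PySem.Chars.join_cons_cons, String.append_assoc]

lemma rowA_one : rowA 1 = PySem.Int.toStr 1 := by decide

lemma rowA_step (i : Int) (h : 3 ≤ i) :
    rowA i = PySem.Int.toStr i ++ " " ++ rowA (i - 2) := by
  unfold rowA
  rw [pyRange_negtwo_cons i 0 (by omega), pyRange_negtwo_cons (i - 2) 0 (by omega)]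
  simp only [List.map_cons]
  rw [str_join_cons_cons]

-- A's value: the join of the rows
lemma funcA_eq (numero : Int) :
    func_triangulo_numeros numero
      = PySem.Str.join "\n" ((PySem.List.pyRange 1 (numero + 1) 2).map rowA) := by
  unfold func_triangulo_numeros rowA
  simp only [PySem.List.foldl_append_singleton_eq_map, List.nil_append]

-- B's loop invariant over the tail of the range (previous row carried along)
lemma tailB (b : Int) (a : Int) (acc : List String) (h : 3 ≤ a) :
    ((PySem.List.pyRange a b 2).foldl
      (fun st i =>
        (st.1 ++ [if i == 1 then PySem.Int.toStr i else PySem.Int.toStr i ++ " " ++ st.2],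
         if i == 1 then PySem.Int.toStr i else PySem.Int.toStr i ++ " " ++ st.2))
      (acc, rowA (a - 2))).1
      = acc ++ (PySem.List.pyRange a b 2).map rowA := by
  by_cases hb : a < b
  · rw [pyRange_two_cons a b hb]
    have hne : (a == 1) = false := by simp; omega
    simp only [List.foldl_cons, List.map_cons, hne, Bool.false_eq_true, if_false]
    have hrow : PySem.Int.toStr a ++ " " ++ rowA (a - 2) = rowA a := (rowA_step a h).symm
    have hs : a + 2 - 2 = a := by ring
    have ih := tailB b (a + 2) (acc ++ [rowA a]) (by omega)
    rw [hs] at ih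
    simpa [hrow] using ih
  · rw [pyRange_two_nil a b (by omega)]
    simp
termination_by (b - a).toNat
decreasing_by omega

-- ===== VERDICT (by name: the statement is the Claim_ definition above) =====
theorem func_triangulo_numeros_spec : Claim_equal_func_triangulo_numeros := by
  intro numero _
  unfold Spec_func_triangulo_numeros
  rw [funcA_eq]
  unfold func_triangulo_numeros_alt
  by_cases h : (1 : Int) < numero + 1
  · rw [pyRange_two_cons 1 (numero + 1) h]
    simp only [List.foldl_cons, List.map_cons]
    have h1 : ((1 : Int) == 1) = true := by decide
    simp only [h1, if_true, List.nil_append]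
    have hw : PySem.Int.toStr 1 = rowA (1 + 2 - 2) := by norm_num [rowA_one]
    rw [hw, tailB (numero + 1) (1 + 2) [rowA (1 + 2 - 2)] (by omega)]
    norm_num
  · rw [pyRange_two_nil 1 (numero + 1) (by omega)]
    simp
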